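-- pv_equiv track=rewrite | github.com/ma-wolpers/blattwerk | app/core/answer_special_matching.py | _distributed_slot_indexes
-- ===== SOURCE A (Python) =====
-- def _center_out_indices(total):
--     """Liefert Indexreihenfolge von der Mitte nach außen."""
--     if total <= 0:
--         return []
--
--     center = (total - 1) / 2.0
--     return sorted(range(total), key=lambda idx: (abs(idx - center), idx))
--
-- def _distributed_slot_indexes(total_slots, item_count, lane_align):
--     """Verteilt Item-Slots deterministisch über den gemeinsamen Slotraum."""
--     if total_slots <= 0 or item_count <= 0:
--         return []
--     if item_count >= total_slots:
--         return list(range(1, total_slots + 1))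
--     if item_count == 1:
--         if lane_align == "start":
--             return [1]
--         if lane_align == "end":
--             return [total_slots]
--         return [max(1, ((total_slots + 1) // 2))]
--
--     if lane_align == "start":
--         return list(range(1, item_count + 1))
--     if lane_align == "end":
--         offset = total_slots - item_count
--         return [offset + value for value in range(1, item_count + 1)]
--
--     extra_slots = total_slots - item_count
--     intervals = item_count + 1
--     gap_base = extra_slots // intervals
--     gap_remainder = extra_slots % intervals
--     gaps = [gap_base] * intervals
--
--     for gap_index in _center_out_indices(intervals)[:gap_remainder]:
--         gaps[gap_index] += 1
--
--     positions = []
--     current_slot = 1 + gaps[0]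
--     for item_index in range(item_count):
--         positions.append(current_slot)
--         current_slot += 1 + gaps[item_index + 1]
--
--     return positions
-- ===== SOURCE B (Python) =====
-- def _distributed_slot_indexes(total_slots, item_count, lane_align):
--     """Verteilt Item-Slots deterministisch ueber den gemeinsamen Slotraum.
--
--     Statt die Mitte-nach-aussen-Reihenfolge per Sortierung zu erzeugen, wird
--     fuer jede Luecke ihr Rang in dieser Reihenfolge in geschlossener Form
--     berechnet: fuer d = 2*g - (intervals - 1) ist der Rang |d| (d >= 0)
--     bzw. |d| - 1 (d < 0); genau die Luecken mit Rang < Rest werden um 1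
--     vergroessert. Ein Durchlauf, keine Sortierung.
--     """
--     if total_slots <= 0 or item_count <= 0:
--         return []
--     if item_count >= total_slots:
--         return list(range(1, total_slots + 1))
--     if item_count == 1:
--         if lane_align == "start":
--             return [1]
--         if lane_align == "end":
--             return [total_slots]
--         return [(total_slots + 1) // 2]
--     if lane_align == "start":
--         return list(range(1, item_count + 1))
--     if lane_align == "end":
--         return list(range(total_slots - item_count + 1, total_slots + 1))
--
--     intervals = item_count + 1
--     gap_base, gap_remainder = divmod(total_slots - item_count, intervals)
--
--     def widened(g):
--         d = 2 * g - (intervals - 1)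
--         return (abs(d) - (1 if d < 0 else 0)) < gap_remainder
--
--     positions = []
--     current = 0
--     for k in range(item_count):
--         current += 1 + gap_base + (1 if widened(k) else 0)
--         positions.append(current)
--     return positions
-- ===== Notes on version B (the rewrite author's own statement) =====
-- stated objective: alternative
-- what changed: Instead of sorting all gap indices by distance-from-center and bumping the first remainder of them, B computes each gap's rank in the center-out order in closed form (rank = |2g-(intervals-1)|, minus 1 left of center) and emits positions in a single accumulating pass without a sort.
import Mathlib
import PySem

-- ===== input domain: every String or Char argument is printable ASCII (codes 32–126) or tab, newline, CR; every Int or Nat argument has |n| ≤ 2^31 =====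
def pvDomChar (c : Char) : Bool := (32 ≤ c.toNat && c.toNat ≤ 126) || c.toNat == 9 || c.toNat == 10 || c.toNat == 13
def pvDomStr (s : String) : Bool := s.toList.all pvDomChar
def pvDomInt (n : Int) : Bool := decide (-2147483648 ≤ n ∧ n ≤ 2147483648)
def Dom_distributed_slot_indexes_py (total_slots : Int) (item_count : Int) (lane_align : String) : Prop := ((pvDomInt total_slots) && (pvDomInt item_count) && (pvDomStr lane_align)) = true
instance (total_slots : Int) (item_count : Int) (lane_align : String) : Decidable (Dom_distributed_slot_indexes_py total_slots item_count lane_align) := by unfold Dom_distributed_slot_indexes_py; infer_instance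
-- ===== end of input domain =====

-- B replaces A's sort of all gap indices by distance-from-center with a closed-form
-- per-gap rank test, computed in one accumulating pass (no sort).

-- ===== PORT A =====

/-- Port of `_center_out_indices`.  Python's sort key is the float pair
`(abs(idx - center), idx)` with `center = (total - 1) / 2.0`.  For the admitted
inputs (|idx|, |total| ≤ 2^31) the float `abs(idx - center)` is exactly
`|2*idx - (total-1)| / 2` (halves of such ints are exact binary floats), so
comparing those floats is exactly comparing the integer `|2*idx - (total-1)|`;
the port carries that doubled value as the first key component (exact). -/
def center_out_indices_py (total : Int) : List Int :=
  if total ≤ 0 then []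
  else
    PySem.List.sorted2 (PySem.List.pyRange 0 total 1)
      (fun idx => |2 * idx - (total - 1)|) (fun idx => idx)

/-- Port of `_distributed_slot_indexes` (A).  `gaps[gap_index] += 1` and the
`gaps[...]` reads are ported with `pySetD`/`pyGetD`; the indexes are provably in
range there (they come from `range(intervals)` resp. `range(item_count)`), where
those primitives agree exactly with Python list indexing. -/
def distributed_slot_indexes_py (total_slots : Int) (item_count : Int) (lane_align : String) : List Int :=
  if total_slots ≤ 0 ∨ item_count ≤ 0 then []
  else if item_count ≥ total_slots then PySem.List.pyRange 1 (total_slots + 1) 1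
  else if item_count = 1 then
    if lane_align = "start" then [1]
    else if lane_align = "end" then [total_slots]
    else [max 1 (PySem.Int.floordiv (total_slots + 1) 2)]
  else if lane_align = "start" then PySem.List.pyRange 1 (item_count + 1) 1
  else if lane_align = "end" then
    let offset := total_slots - item_count
    (PySem.List.pyRange 1 (item_count + 1) 1).map (fun value => offset + value)
  else
    let extra_slots := total_slots - item_count
    let intervals := item_count + 1
    let gap_base := PySem.Int.floordiv extra_slots intervals
    let gap_remainder := PySem.Int.mod extra_slots intervals
    let gaps0 : List Int := List.replicate intervals.toNat gap_base
    let gaps :=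
      (PySem.List.slice (center_out_indices_py intervals) none (some gap_remainder)).foldl
        (fun gaps gap_index =>
          PySem.List.pySetD gaps gap_index (PySem.List.pyGetD gaps gap_index 0 + 1)) gaps0
    ((PySem.List.pyRange 0 item_count 1).foldl
      (fun (st : List Int × Int) item_index =>
        (st.1 ++ [st.2], st.2 + (1 + PySem.List.pyGetD gaps (item_index + 1) 0)))
      ([], 1 + PySem.List.pyGetD gaps 0 0)).1

-- ===== PORT B =====

/-- Port of B: closed-form center-out rank per gap, one accumulating pass. -/
def distributed_slot_indexes_py_alt (total_slots : Int) (item_count : Int) (lane_align : String) : List Int :=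
  if total_slots ≤ 0 ∨ item_count ≤ 0 then []
  else if item_count ≥ total_slots then PySem.List.pyRange 1 (total_slots + 1) 1
  else if item_count = 1 then
    if lane_align = "start" then [1]
    else if lane_align = "end" then [total_slots]
    else [PySem.Int.floordiv (total_slots + 1) 2]
  else if lane_align = "start" then PySem.List.pyRange 1 (item_count + 1) 1
  else if lane_align = "end" then
    PySem.List.pyRange (total_slots - item_count + 1) (total_slots + 1) 1
  else
    let intervals := item_count + 1
    let gap_base := PySem.Int.floordiv (total_slots - item_count) intervals
    let gap_remainder := PySem.Int.mod (total_slots - item_count) intervals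
    let widened : Int → Bool := fun g =>
      let d := 2 * g - (intervals - 1)
      decide (|d| - (if d < 0 then (1 : Int) else 0) < gap_remainder)
    ((PySem.List.pyRange 0 item_count 1).foldl
      (fun (st : List Int × Int) k =>
        let cur := st.2 + 1 + gap_base + (if widened k then (1 : Int) else 0)
        (st.1 ++ [cur], cur)) ([], 0)).1

-- ===== PRECONDITION & SPEC =====
def Spec_distributed_slot_indexes_py (total_slots : Int) (item_count : Int) (lane_align : String) (out : List Int) : Prop := out = distributed_slot_indexes_py_alt total_slots item_count lane_align
instance (total_slots : Int) (item_count : Int) (lane_align : String) (out : List Int) : Decidable (Spec_distributed_slot_indexes_py total_slots item_count lane_align out) := by unfold Spec_distributed_slot_indexes_py; infer_instance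

-- ===== CLAIM (what is proved, stated in full; the proofs are below) =====
def Claim_equal_distributed_slot_indexes_py : Prop := ∀ (total_slots : Int) (item_count : Int) (lane_align : String), Dom_distributed_slot_indexes_py total_slots item_count lane_align → Spec_distributed_slot_indexes_py total_slots item_count lane_align (distributed_slot_indexes_py total_slots item_count lane_align)

-- ===== LEMMAS AND PROOFS =====

/-- The full center-out index order, as explicit interleaved pairs. -/
def pvPairs (lo hi : Int) : Nat → List Int
  | 0 => []
  | c + 1 => lo :: hi :: pvPairs (lo - 1) (hi + 1) c

/-- The full center-out order of `range n` (`n > 0`). -/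
def pvCoList (n : Int) : List Int :=
  if n % 2 = 0 then pvPairs (n / 2 - 1) (n / 2) (n / 2).toNat
  else n / 2 :: pvPairs (n / 2 - 1) (n / 2 + 1) (n / 2).toNat

/-- Rank of index `i` in the center-out order of `range n` (B's closed form). -/
def pvRank (n i : Int) : Int :=
  |2 * i - (n - 1)| - (if 2 * i - (n - 1) < 0 then 1 else 0)

/-- Single integer key order-isomorphic (on `0 ≤ i < n`) to A's sort key. -/
def pvKey (n i : Int) : Int := n * |2 * i - (n - 1)| + i

lemma pvPairs_length : ∀ (c : Nat) (lo hi : Int), (pvPairs lo hi c).length = 2 * c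
  | 0, _, _ => rfl
  | c + 1, lo, hi => by simp [pvPairs, pvPairs_length c]; omega

lemma mem_pvPairs : ∀ (c : Nat) (lo hi x : Int),
    x ∈ pvPairs lo hi c ↔ ∃ j : Nat, j < c ∧ (x = lo - j ∨ x = hi + j)
  | 0, lo, hi, x => by simp [pvPairs]
  | c + 1, lo, hi, x => by
    simp only [pvPairs, List.mem_cons, mem_pvPairs c]
    constructor
    · rintro (rfl | rfl | ⟨j, hj, h | h⟩)
      · exact ⟨0, by omega, Or.inl (by simp)⟩
      · exact ⟨0, by omega, Or.inr (by simp)⟩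
      · exact ⟨j + 1, by omega, Or.inl (by push_cast; omega)⟩
      · exact ⟨j + 1, by omega, Or.inr (by push_cast; omega)⟩
    · rintro ⟨j, hj, h | h⟩
      · rcases j with _ | j
        · left; simpa using h
        · right; right; exact ⟨j, by omega, Or.inl (by push_cast at h ⊢; omega)⟩
      · rcases j with _ | j
        · right; left; simpa using h
        · right; right; exact ⟨j, by omega, Or.inr (by push_cast at h ⊢; omega)⟩

lemma nodup_pvPairs : ∀ (c : Nat) (lo hi : Int), lo < hi → (pvPairs lo hi c).Nodup
  | 0, _, _, _ => by simp [pvPairs]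
  | c + 1, lo, hi, h => by
    simp only [pvPairs, List.nodup_cons, List.mem_cons, mem_pvPairs]
    refine ⟨?_, ?_, nodup_pvPairs c (lo - 1) (hi + 1) (by omega)⟩
    · rintro (h' | ⟨j, hj, h' | h'⟩) <;> omega
    · rintro ⟨j, hj, h' | h'⟩ <;> omega

lemma length_pvCoList (n : Int) (hn : 0 < n) : (pvCoList n).length = n.toNat := by
  unfold pvCoList
  split_ifs <;> simp [pvPairs_length] <;> omega

lemma mem_pvCoList (n x : Int) (hn : 0 < n) : x ∈ pvCoList n ↔ 0 ≤ x ∧ x < n := by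
  unfold pvCoList
  split_ifs with hpar
  · rw [mem_pvPairs]
    constructor
    · rintro ⟨j, hj, h | h⟩ <;> omega
    · intro hx
      by_cases hside : x ≤ n / 2 - 1
      · exact ⟨(n / 2 - 1 - x).toNat, by omega, Or.inl (by omega)⟩
      · exact ⟨(x - n / 2).toNat, by omega, Or.inr (by omega)⟩
  · simp only [List.mem_cons, mem_pvPairs]
    constructor
    · rintro (rfl | ⟨j, hj, h | h⟩) <;> omega
    · intro hx
      by_cases hmid : x = n / 2
      · exact Or.inl hmid
      · by_cases hside : x ≤ n / 2 - 1
        · exact Or.inr ⟨(n / 2 - 1 - x).toNat, by omega, Or.inl (by omega)⟩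
        · exact Or.inr ⟨(x - (n / 2 + 1)).toNat, by omega, Or.inr (by omega)⟩

lemma nodup_pvCoList (n : Int) (hn : 0 < n) : (pvCoList n).Nodup := by
  unfold pvCoList
  split_ifs with hpar
  · exact nodup_pvPairs _ _ _ (by omega)
  · refine List.nodup_cons.mpr ⟨?_, nodup_pvPairs _ _ _ (by omega)⟩
    rw [mem_pvPairs]
    rintro ⟨j, hj, h | h⟩ <;> omega

lemma perm_pvCoList (n : Int) (hn : 0 < n) :
    (pvCoList n).Perm (PySem.List.pyRange 0 n 1) := by
  rw [List.perm_ext_iff_of_nodup (nodup_pvCoList n hn) (PySem.List.nodup_pyRange_one 0 n)]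
  intro a
  rw [mem_pvCoList n a hn, PySem.List.mem_pyRange_one]

lemma pvPairs_getElem : ∀ (c : Nat) (lo hi : Int) (j : Nat) (hj : j < (pvPairs lo hi c).length),
    (pvPairs lo hi c)[j] = if j % 2 = 0 then lo - (j / 2 : Nat) else hi + (j / 2 : Nat)
  | 0, lo, hi, j, hj => by simp [pvPairs] at hj
  | c + 1, lo, hi, 0, hj => by simp [pvPairs]
  | c + 1, lo, hi, 1, hj => by simp [pvPairs]
  | c + 1, lo, hi, (k + 2), hj => by
    have hj' : k < (pvPairs (lo - 1) (hi + 1) c).length := by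
      rw [pvPairs_length] at hj ⊢; omega
    simp only [pvPairs, List.getElem_cons_succ]
    rw [pvPairs_getElem c (lo - 1) (hi + 1) k hj']
    have h1 : (k + 2) % 2 = k % 2 := by omega
    have h2 : (k + 2) / 2 = k / 2 + 1 := by omega
    rw [h1, h2]
    split <;> push_cast <;> ring

lemma pvRank_eval (n i : Int) :
    pvRank n i = if 2 * i - (n - 1) < 0 then (n - 1) - 2 * i - 1 else 2 * i - (n - 1) := by
  unfold pvRank
  split_ifs with h
  · rw [abs_of_neg h]; ring
  · rw [abs_of_nonneg (by omega)]; ring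

lemma pvCoList_rank_getElem (n : Int) (hn : 0 < n) (j : Nat) (hj : j < (pvCoList n).length) :
    pvRank n ((pvCoList n)[j]) = (j : Int) := by
  unfold pvCoList at hj ⊢
  split_ifs at hj ⊢ with hpar
  · rw [pvPairs_getElem _ _ _ j hj, pvRank_eval]
    rw [pvPairs_length] at hj
    split_ifs <;> omega
  · rcases j with _ | k
    · simp only [List.getElem_cons_zero]
      rw [pvRank_eval]
      split_ifs <;> omega
    · have hk : k < (pvPairs (n / 2 - 1) (n / 2 + 1) (n / 2).toNat).length := by
        simpa using hj
      simp only [List.getElem_cons_succ]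
      rw [pvPairs_getElem _ _ _ k hk, pvRank_eval]
      rw [pvPairs_length] at hk
      split_ifs <;> push_cast <;> omega

lemma mem_take_pvCoList (n r x : Int) (hn : 0 < n) (hr0 : 0 ≤ r) (hrn : r ≤ n) :
    x ∈ (pvCoList n).take r.toNat ↔ 0 ≤ x ∧ x < n ∧ pvRank n x < r := by
  have hlen := length_pvCoList n hn
  constructor
  · intro hx
    have hmem : x ∈ pvCoList n := List.mem_of_mem_take hx
    obtain ⟨hx0, hxn⟩ := (mem_pvCoList n x hn).mp hmem
    refine ⟨hx0, hxn, ?_⟩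
    rw [List.mem_take_iff_getElem] at hx
    obtain ⟨i, hi, hix⟩ := hx
    have : pvRank n x = (i : Int) := by
      rw [← hix]
      exact pvCoList_rank_getElem n hn i (by omega)
    omega
  · rintro ⟨hx0, hxn, hrank⟩
    have hmem : x ∈ pvCoList n := (mem_pvCoList n x hn).mpr ⟨hx0, hxn⟩
    obtain ⟨i, hi, hix⟩ := List.mem_iff_getElem.mp hmem
    have hri : pvRank n x = (i : Int) := by
      rw [← hix]; exact pvCoList_rank_getElem n hn i hi
    rw [List.mem_take_iff_getElem]
    exact ⟨i, by omega, hix⟩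

lemma pairwise_pvPairs_key (n : Int) (hn : 0 < n) :
    ∀ (c : Nat) (lo hi : Int), lo + hi = n - 1 → lo < hi → (c : Int) ≤ lo + 1 →
      (pvPairs lo hi c).Pairwise (fun a b => pvKey n a < pvKey n b)
  | 0, lo, hi, _, _, _ => by simp [pvPairs]
  | c + 1, lo, hi, hsum, hlt, hc => by
    have hcc : (c : Int) ≤ lo := by push_cast at hc; omega
    have hklo : |2 * lo - (n - 1)| = hi - lo := by rw [abs_of_nonpos (by omega)]; omega
    have hkhi : |2 * hi - (n - 1)| = hi - lo := by rw [abs_of_nonneg (by omega)]; omega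
    have hmem : ∀ x ∈ pvPairs (lo - 1) (hi + 1) c,
        hi - lo + 2 ≤ |2 * x - (n - 1)| ∧ lo - c ≤ x ∧ x ≤ hi + c := by
      intro x hx
      rw [mem_pvPairs] at hx
      obtain ⟨j, hj, h | h⟩ := hx
      · refine ⟨?_, by omega, by omega⟩
        rw [abs_of_nonpos (by omega)]; omega
      · refine ⟨?_, by omega, by omega⟩
        rw [abs_of_nonneg (by omega)]; omega
    have hbig : ∀ x ∈ pvPairs (lo - 1) (hi + 1) c, pvKey n hi < pvKey n x := by
      intro x hx
      obtain ⟨habs, hxlo, hxhi⟩ := hmem x hx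
      have h1 : n * (hi - lo + 2) ≤ n * |2 * x - (n - 1)| :=
        mul_le_mul_of_nonneg_left habs hn.le
      have h2 : n * (hi - lo + 2) = n * (hi - lo) + 2 * n := by ring
      have h3 : hi - 2 * n < x := by omega
      simp only [pvKey]
      rw [hkhi]
      linarith
    simp only [pvPairs, List.pairwise_cons, List.mem_cons]
    refine ⟨?_, ?_, pairwise_pvPairs_key n hn c (lo - 1) (hi + 1) (by omega) (by omega) (by push_cast; omega)⟩
    · rintro b (rfl | hb)
      · simp only [pvKey]; rw [hklo, hkhi]; linarith
      · have h1 := hbig b hb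
        have h2 : pvKey n lo < pvKey n hi := by
          simp only [pvKey]; rw [hklo, hkhi]; linarith
        linarith
    · exact hbig

lemma pairwise_pvCoList_key (n : Int) (hn : 0 < n) :
    (pvCoList n).Pairwise (fun a b => pvKey n a < pvKey n b) := by
  unfold pvCoList
  split_ifs with hpar
  · exact pairwise_pvPairs_key n hn _ _ _ (by omega) (by omega) (by omega)
  · refine List.pairwise_cons.mpr ⟨?_, pairwise_pvPairs_key n hn _ _ _ (by omega) (by omega) (by omega)⟩
    intro b hb
    rw [mem_pvPairs] at hb
    have hkmid : |2 * (n / 2) - (n - 1)| = 0 := by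
      rw [abs_of_nonneg (by omega)]; omega
    obtain ⟨j, hj, h | h⟩ := hb
    · have habs : |2 * b - (n - 1)| = 2 + 2 * (j : Int) := by
        rw [abs_of_nonpos (by omega)]; omega
      have h1 : n * 2 ≤ n * (2 + 2 * (j : Int)) :=
        mul_le_mul_of_nonneg_left (by omega) hn.le
      simp only [pvKey]
      rw [hkmid, habs]
      have hb0 : 0 ≤ b := by omega
      have h5 : n / 2 < 2 * n := by omega
      linarith
    · have habs : |2 * b - (n - 1)| = 2 + 2 * (j : Int) := by
        rw [abs_of_nonneg (by omega)]; omega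
      have h1 : n * 2 ≤ n * (2 + 2 * (j : Int)) :=
        mul_le_mul_of_nonneg_left (by omega) hn.le
      simp only [pvKey]
      rw [hkmid, habs]
      have hb0 : 0 ≤ b := by omega
      have h5 : n / 2 < 2 * n := by omega
      linarith

lemma pvBefore_eq (n a b : Int) (hn : 0 < n) (ha0 : 0 ≤ a) (han : a < n)
    (hb0 : 0 ≤ b) (hbn : b < n) :
    (decide (|2 * a - (n - 1)| < |2 * b - (n - 1)|) ||
      (!decide (|2 * b - (n - 1)| < |2 * a - (n - 1)|) && decide (a < b)))
      = decide (pvKey n a < pvKey n b) := by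
  have hpa : |2 * a - (n - 1)| < n := by
    rcases abs_cases (2 * a - (n - 1)) with ⟨h, _⟩ | ⟨h, _⟩ <;> omega
  have hpb : |2 * b - (n - 1)| < n := by
    rcases abs_cases (2 * b - (n - 1)) with ⟨h, _⟩ | ⟨h, _⟩ <;> omega
  have hpa0 : 0 ≤ |2 * a - (n - 1)| := abs_nonneg _
  have hpb0 : 0 ≤ |2 * b - (n - 1)| := abs_nonneg _
  set p := |2 * a - (n - 1)| with hp
  set q := |2 * b - (n - 1)| with hq
  rw [Bool.eq_iff_iff]
  simp only [Bool.or_eq_true, Bool.and_eq_true, Bool.not_eq_true', decide_eq_true_eq,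
    decide_eq_false_iff_not, pvKey, ← hp, ← hq]
  rcases lt_trichotomy p q with h | h | h
  · have h1 : n * (p + 1) ≤ n * q := mul_le_mul_of_nonneg_left (by omega) hn.le
    have h2 : n * (p + 1) = n * p + n := by ring
    constructor
    · intro _; linarith
    · intro _; exact Or.inl h
  · rw [h]
    constructor
    · rintro (h' | ⟨_, hab⟩)
      · exact absurd h' (lt_irrefl q)
      · linarith
    · intro h'
      exact Or.inr ⟨lt_irrefl q, by linarith⟩
  · have h1 : n * (q + 1) ≤ n * p := mul_le_mul_of_nonneg_left (by omega) hn.le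
    have h2 : n * (q + 1) = n * q + n := by ring
    constructor
    · rintro (h' | ⟨h', _⟩)
      · omega
      · exact absurd h h'
    · intro h'; linarith

lemma insertBy_congr (b1 b2 : Int → Int → Bool) (x : Int) :
    ∀ (ys : List Int), (∀ y ∈ ys, b1 x y = b2 x y) →
      PySem.List.insertBy b1 x ys = PySem.List.insertBy b2 x ys
  | [], _ => rfl
  | y :: t, h => by
    have ht := insertBy_congr b1 b2 x t (fun z hz => h z (List.mem_cons_of_mem _ hz))
    simp only [PySem.List.insertBy, h y (List.mem_cons_self), ht]

lemma foldl_insertBy_congr (b1 b2 : Int → Int → Bool) (S : List Int)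
    (hS : ∀ a ∈ S, ∀ b ∈ S, b1 a b = b2 a b) :
    ∀ (xs acc : List Int), (∀ x ∈ xs, x ∈ S) → (∀ y ∈ acc, y ∈ S) →
      xs.foldl (fun acc x => PySem.List.insertBy b1 x acc) acc
        = xs.foldl (fun acc x => PySem.List.insertBy b2 x acc) acc
  | [], acc, _, _ => rfl
  | x :: t, acc, hxs, hacc => by
    simp only [List.foldl_cons]
    have hx : x ∈ S := hxs x (List.mem_cons_self)
    rw [insertBy_congr b1 b2 x acc (fun y hy => hS x hx y (hacc y hy))]
    exact foldl_insertBy_congr b1 b2 S hS t _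
      (fun z hz => hxs z (List.mem_cons_of_mem _ hz))
      (fun y hy => by
        rcases (PySem.List.mem_insertBy _ _ _ _).mp hy with rfl | hy'
        · exact hx
        · exact hacc y hy')

lemma center_out_eq (n : Int) (hn : 0 < n) : center_out_indices_py n = pvCoList n := by
  unfold center_out_indices_py
  rw [if_neg (by omega)]
  have h1 : PySem.List.sorted2 (PySem.List.pyRange 0 n 1)
      (fun i => |2 * i - (n - 1)|) (fun i => i) false
      = (PySem.List.pyRange 0 n 1).foldl
          (fun acc x => PySem.List.insertBy
            (fun a b => decide (|2 * a - (n - 1)| < |2 * b - (n - 1)|) ||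
              (!decide (|2 * b - (n - 1)| < |2 * a - (n - 1)|) && decide (a < b))) x acc) [] := rfl
  rw [h1]
  rw [foldl_insertBy_congr _ (fun a b => decide (pvKey n a < pvKey n b))
      (PySem.List.pyRange 0 n 1)
      (fun a ha b hb => by
        rw [PySem.List.mem_pyRange_one] at ha hb
        exact pvBefore_eq n a b hn ha.1 ha.2 hb.1 hb.2)
      _ [] (fun x hx => hx) (by simp)]
  rw [← PySem.List.sorted_eq_foldl_insertBy]
  exact PySem.List.sorted_eq_of_perm_of_pairwise_lt _ _ _
    (perm_pvCoList n hn) (pairwise_pvCoList_key n hn)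

lemma foldl_bump : ∀ (bs : List Int) (g : List Int),
    (∀ b ∈ bs, 0 ≤ b ∧ b < (g.length : Int)) → bs.Nodup →
    ((bs.foldl (fun g b => PySem.List.pySetD g b (PySem.List.pyGetD g b 0 + 1)) g).length = g.length ∧
     ∀ j : Nat, j < g.length →
       (bs.foldl (fun g b => PySem.List.pySetD g b (PySem.List.pyGetD g b 0 + 1)) g).getD j 0
         = g.getD j 0 + (if (j : Int) ∈ bs then 1 else 0))
  | [], g, _, _ => ⟨rfl, fun j _ => by simp⟩
  | b :: t, g, hb, hnd => by
    simp only [List.foldl_cons]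
    have hb0 := hb b (List.mem_cons_self)
    have hbl : b.toNat < g.length := by omega
    have hset : PySem.List.pySetD g b (PySem.List.pyGetD g b 0 + 1)
        = g.set b.toNat (g.getD b.toNat 0 + 1) := by
      rw [PySem.List.pySetD_of_nonneg g _ hb0.1,
        PySem.List.pyGetD_eq_getElem g 0 hb0.1 (by simpa using hb0.2),
        List.getD_eq_getElem g 0 hbl]
    rw [hset]
    have hlen' : (g.set b.toNat (g.getD b.toNat 0 + 1)).length = g.length := by
      simp
    obtain ⟨ihlen, ihget⟩ := foldl_bump t (g.set b.toNat (g.getD b.toNat 0 + 1))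
      (fun x hx => by rw [hlen']; exact hb x (List.mem_cons_of_mem _ hx))
      (List.nodup_cons.mp hnd).2
    refine ⟨by rw [ihlen, hlen'], ?_⟩
    intro j hj
    rw [ihget j (by omega)]
    have hnb : b ∉ t := (List.nodup_cons.mp hnd).1
    by_cases hjb : (j : Int) = b
    · have hjn : j = b.toNat := by omega
      have hjt : (j : Int) ∉ t := by rw [hjb]; exact hnb
      have hmem : (j : Int) ∈ b :: t := by rw [hjb]; exact List.mem_cons_self
      subst hjn
      rw [List.getD_eq_getElem _ 0 (by omega), List.getElem_set_self (by omega),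
        if_neg hjt, if_pos hmem]
      ring
    · have hjn : b.toNat ≠ j := by omega
      rw [List.getD_eq_getElem _ 0 (by omega), List.getElem_set_ne hjn (by omega),
        ← List.getD_eq_getElem g 0 hj]
      simp only [List.mem_cons, hjb, false_or]

lemma loop_bridge (f : Int → Int) : ∀ (M : Nat) (P : List Int) (c : Int),
    (List.range M).foldl (fun (st : List Int × Int) (k : Nat) => (st.1 ++ [st.2], st.2 + f ((k : Int) + 1))) (P, c + f 0)
      = (((List.range M).foldl (fun (st : List Int × Int) (k : Nat) => (st.1 ++ [st.2 + f (k : Int)], st.2 + f (k : Int))) (P, c)).1,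
         ((List.range M).foldl (fun (st : List Int × Int) (k : Nat) => (st.1 ++ [st.2 + f (k : Int)], st.2 + f (k : Int))) (P, c)).2
           + f (M : Int)) := by
  intro M
  induction M with
  | zero => intro P c; rfl
  | succ m ih =>
    intro P c
    rw [List.range_succ]
    simp only [List.foldl_append, List.foldl_cons, List.foldl_nil]
    rw [ih]
    have hc : ((m : Int) + 1) = ((m + 1 : Nat) : Int) := by push_cast; ring
    rw [hc]

-- ===== VERDICT (by name: the statement is the Claim_ definition above) =====
theorem distributed_slot_indexes_py_spec : Claim_equal_distributed_slot_indexes_py := by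
  intro ts ic la _hDom
  unfold Spec_distributed_slot_indexes_py
  show distributed_slot_indexes_py ts ic la = distributed_slot_indexes_py_alt ts ic la
  unfold distributed_slot_indexes_py distributed_slot_indexes_py_alt
  by_cases h1 : ts ≤ 0 ∨ ic ≤ 0
  · rw [if_pos h1, if_pos h1]
  rw [if_neg h1, if_neg h1]
  push_neg at h1
  by_cases h2 : ic ≥ ts
  · rw [if_pos h2, if_pos h2]
  rw [if_neg h2, if_neg h2]
  push_neg at h2
  by_cases h3 : ic = 1
  · rw [if_pos h3, if_pos h3]
    by_cases h4 : la = "start"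
    · rw [if_pos h4, if_pos h4]
    rw [if_neg h4, if_neg h4]
    by_cases h5 : la = "end"
    · rw [if_pos h5, if_pos h5]
    rw [if_neg h5, if_neg h5]
    congr 1
    rw [PySem.Int.floordiv_eq_ediv_of_pos (by omega)]
    omega
  rw [if_neg h3, if_neg h3]
  by_cases h4 : la = "start"
  · rw [if_pos h4, if_pos h4]
  rw [if_neg h4, if_neg h4]
  by_cases h5 : la = "end"
  · rw [if_pos h5, if_pos h5]
    dsimp only
    rw [PySem.List.pyRange_one, PySem.List.pyRange_one, List.map_map]
    have hl : ts + 1 - (ts - ic + 1) = ic + 1 - 1 := by ring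
    rw [hl]
    apply List.map_congr_left
    intro k _
    simp only [Function.comp]
    ring
  rw [if_neg h5, if_neg h5]
  -- main (center) branch
  have hic : 2 ≤ ic := by omega
  have hn : (0 : Int) < ic + 1 := by omega
  dsimp only
  rw [center_out_eq (ic + 1) hn]
  set n : Int := ic + 1 with hndef
  set base : Int := PySem.Int.floordiv (ts - ic) n with hbase
  set rem : Int := PySem.Int.mod (ts - ic) n with hremdef
  have hrem : rem = (ts - ic) % n := PySem.Int.mod_eq_emod_of_pos (by omega)
  have hrem0 : 0 ≤ rem := by rw [hrem]; exact Int.emod_nonneg _ (by omega)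
  have hremn : rem < n := by rw [hrem]; exact Int.emod_lt_of_pos _ (by omega)
  rw [PySem.List.slice_to _ hrem0]
  -- characterize the bumped gaps list
  set tk : List Int := (pvCoList n).take rem.toNat with htkdef
  have htk_nodup : tk.Nodup := (nodup_pvCoList n hn).sublist (List.take_sublist _ _)
  have htk_mem : ∀ b ∈ tk, 0 ≤ b ∧ b < n := by
    intro b hb
    exact (mem_pvCoList n b hn).mp (List.mem_of_mem_take hb)
  set g0 : List Int := List.replicate n.toNat base with hg0def
  have hg0len : g0.length = n.toNat := List.length_replicate
  set gaps : List Int :=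
    tk.foldl (fun g b => PySem.List.pySetD g b (PySem.List.pyGetD g b 0 + 1)) g0 with hgapsdef
  obtain ⟨hglen, hgget⟩ := foldl_bump tk g0
    (fun b hb => ⟨(htk_mem b hb).1, by rw [hg0len]; have := (htk_mem b hb).2; omega⟩) htk_nodup
  have hgaps : ∀ j : Nat, j < n.toNat →
      gaps.getD j 0 = base + (if pvRank n (j : Int) < rem then 1 else 0) := by
    intro j hj
    rw [hgapsdef, hgget j (by omega)]
    have hg0 : g0.getD j 0 = base := by
      rw [List.getD_eq_getElem g0 0 (by omega)]
      simp [hg0def]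
    rw [hg0]
    by_cases hr : pvRank n (j : Int) < rem
    · rw [if_pos ((mem_take_pvCoList n rem (j : Int) hn hrem0 (le_of_lt hremn)).mpr
        ⟨by omega, by omega, hr⟩), if_pos hr]
    · rw [if_neg (fun hmem =>
        hr ((mem_take_pvCoList n rem (j : Int) hn hrem0 (le_of_lt hremn)).mp hmem).2.2),
        if_neg hr]
  have hglen' : gaps.length = n.toNat := by rw [hgapsdef, hglen, hg0len]
  -- both position loops compute the same prefix sums
  set f : Int → Int := fun t => 1 + base + (if pvRank n t < rem then 1 else 0) with hf
  rw [PySem.List.pyRange_one]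
  simp only [Int.sub_zero, List.foldl_map, zero_add]
  have hstepA : ∀ (st : List Int × Int) (k : Nat), k ∈ List.range ic.toNat →
      (st.1 ++ [st.2], st.2 + (1 + PySem.List.pyGetD gaps ((k : Int) + 1) 0))
        = (st.1 ++ [st.2], st.2 + f ((k : Int) + 1)) := by
    intro st k hk
    rw [List.mem_range] at hk
    have hc : ((k : Int) + 1) = ((k + 1 : Nat) : Int) := by push_cast; ring
    have hval : st.2 + (1 + (base + (if pvRank n ((k + 1 : Nat) : Int) < rem then (1 : Int) else 0)))
        = st.2 + f ((k + 1 : Nat) : Int) := by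
      simp only [hf]; ring
    rw [hc, PySem.List.pyGetD_natCast, hgaps (k + 1) (by omega), hval]
  rw [PySem.List.foldl_congr_mem (List.range ic.toNat) _
    (fun (st : List Int × Int) (k : Nat) => (st.1 ++ [st.2], st.2 + f ((k : Int) + 1)))
    _ hstepA]
  have hinit : (1 : Int) + PySem.List.pyGetD gaps 0 0 = 0 + f 0 := by
    rw [PySem.List.pyGetD_zero]
    have h0 : gaps.getD 0 0 = base + (if pvRank n ((0 : Nat) : Int) < rem then 1 else 0) :=
      hgaps 0 (by omega)
    simp only [Nat.cast_zero] at h0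
    rw [h0]
    simp only [hf]
    ring
  rw [hinit, loop_bridge f ic.toNat [] 0]
  have hstepB : ∀ (st : List Int × Int) (k : Nat), k ∈ List.range ic.toNat →
      (st.1 ++ [st.2 + 1 + base +
          (if (decide (|2 * (k : Int) - (n - 1)| -
            (if 2 * (k : Int) - (n - 1) < 0 then (1 : Int) else 0) < rem)) = true then (1 : Int) else 0)],
        st.2 + 1 + base +
          (if (decide (|2 * (k : Int) - (n - 1)| -
            (if 2 * (k : Int) - (n - 1) < 0 then (1 : Int) else 0) < rem)) = true then (1 : Int) else 0))
        = (st.1 ++ [st.2 + f (k : Int)], st.2 + f (k : Int)) := by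
    intro st k _
    have hw : (if (decide (|2 * (k : Int) - (n - 1)| -
        (if 2 * (k : Int) - (n - 1) < 0 then (1 : Int) else 0) < rem)) = true then (1 : Int) else 0)
        = (if pvRank n (k : Int) < rem then (1 : Int) else 0) := by
      simp [pvRank]
    have hval : st.2 + 1 + base + (if pvRank n (k : Int) < rem then (1 : Int) else 0)
        = st.2 + f (k : Int) := by
      simp only [hf]; ring
    rw [hw, hval]
  rw [PySem.List.foldl_congr_mem (List.range ic.toNat) _
    (fun (st : List Int × Int) (k : Nat) => (st.1 ++ [st.2 + f (k : Int)], st.2 + f (k : Int)))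
    _ hstepB]
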